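-- pv_equiv track=rewrite | github.com/Almamy78593/Optimisation-Algorithms | outils.py | add
-- ===== SOURCE A (Python) =====
-- def add(X, V):
--     """
--     Additionne deux positions ou une position et une vitesse.
--     X: La première position ou la position.
--     V: La deuxième vitesse ou la vitesse.
--     Returns: La position ou la vitesse résultante.
--     """
--     # Vérification de la validité des entrées
--     result = []
--     if isinstance(X, list):
--         # Addition de deux vitesses
--         for x in X:
--           if isinstance(x, list):
--               for i in X:
--                   result.append(i)
--               for i in V:
--                   result.append(i)
--               return result
--
--     # Permutation
--     new_x = X.copy()
--     for v in V:
--         va=v[0]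
--         vb=v[1]
--         idx_new_va = 0
--         idx_new_vb = 0
--         for i in range(len(X)):
--             if new_x[i] == va:
--                 idx_new_va = i
--             if new_x[i] == vb:
--                 idx_new_vb = i
--         if idx_new_va != idx_new_vb:
--             new_x[idx_new_va] = vb
--             new_x[idx_new_vb] = va
--
--     return new_x
-- ===== SOURCE B (Python) =====
-- def add(X, V):
--     """
--     Additionne deux positions ou une position et une vitesse.
--     X: La première position ou la position.
--     V: La deuxième vitesse ou la vitesse.
--     Returns: La position ou la vitesse résultante.
--     """
--     # Apply the swap sequence with a value -> set-of-indices dictionary updated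
--     # on each swap (last occurrence = max of the set), instead of rescanning
--     # the whole list for both swap values on every swap.
--     new_x = list(X)
--     pos = {}
--     for i, x in enumerate(new_x):
--         pos.setdefault(x, set()).add(i)
--     for v in V:
--         va, vb = v[0], v[1]
--         sa = pos.get(va)
--         sb = pos.get(vb)
--         ia = max(sa) if sa else 0
--         ib = max(sb) if sb else 0
--         if ia != ib:
--             a_old, b_old = new_x[ia], new_x[ib]
--             new_x[ia] = vb
--             new_x[ib] = va
--             pos.setdefault(a_old, set()).discard(ia)
--             pos.setdefault(b_old, set()).discard(ib)
--             pos.setdefault(vb, set()).add(ia)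
--             pos.setdefault(va, set()).add(ib)
--     return new_x
-- ===== Notes on version B (the rewrite author's own statement) =====
-- stated objective: faster
-- what changed: Replaces A's full rescan of the list on every swap (to locate both swap values) by a value -> set-of-indices dictionary built once and updated on each swap; the last occurrence is the max of a (typically tiny) index set instead of an O(n) scan.
import Mathlib
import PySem

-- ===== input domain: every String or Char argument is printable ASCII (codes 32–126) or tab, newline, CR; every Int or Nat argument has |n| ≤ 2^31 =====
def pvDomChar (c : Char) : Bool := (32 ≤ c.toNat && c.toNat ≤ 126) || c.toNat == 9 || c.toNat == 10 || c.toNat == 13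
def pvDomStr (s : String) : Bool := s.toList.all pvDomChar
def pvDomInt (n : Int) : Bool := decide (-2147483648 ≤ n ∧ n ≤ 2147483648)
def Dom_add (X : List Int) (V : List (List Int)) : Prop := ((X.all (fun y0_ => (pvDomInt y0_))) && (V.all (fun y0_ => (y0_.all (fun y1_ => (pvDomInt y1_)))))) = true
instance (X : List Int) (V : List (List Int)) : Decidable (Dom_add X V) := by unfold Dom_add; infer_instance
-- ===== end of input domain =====

-- B replaces A's full rescan of the list on every swap (to locate both swap values) by a
-- value → set-of-indices dictionary built once and updated on each swap.

-- ===== PORT A =====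
-- A's `isinstance` branch (concatenating two lists of lists) can never fire when X : List Int,
-- so the port is the permutation path only.
def addScan (new_x : List Int) (va vb : Int) (n : Int) : Int × Int :=
  (PySem.List.pyRange 0 n 1).foldl
    (fun (p : Int × Int) i =>
      (if PySem.List.pyGetD new_x i 0 = va then i else p.1,
       if PySem.List.pyGetD new_x i 0 = vb then i else p.2))
    (0, 0)

def addStep (X : List Int) (new_x : List Int) (v : List Int) : List Int :=
  match PySem.List.pyGet? v 0, PySem.List.pyGet? v 1 with
  | some va, some vb =>
      let p := addScan new_x va vb (X.length : Int)
      if p.1 ≠ p.2 then (new_x.set p.1.toNat vb).set p.2.toNat va else new_x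
  | _, _ => new_x   -- v[0] / v[1] raises IndexError in Python; excluded by Pre_add

def add (X : List Int) (V : List (List Int)) : List Int :=
  V.foldl (addStep X) X

-- ===== PORT B =====
def altInit (X : List Int) : PySem.Dict Int (List Int) :=
  (PySem.List.enumerate X 0).foldl
    (fun d p => d.modify p.2 [] (fun s => PySem.Set.add s p.1)) PySem.Dict.empty

def altStep (st : List Int × PySem.Dict Int (List Int)) (v : List Int) :
    List Int × PySem.Dict Int (List Int) :=
  match PySem.List.pyGet? v 0, PySem.List.pyGet? v 1 with
  | some va, some vb =>
      let sa := st.2.getD va []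
      let sb := st.2.getD vb []
      let ia := if sa = [] then 0 else (PySem.List.max? sa (fun x => x)).getD 0
      let ib := if sb = [] then 0 else (PySem.List.max? sb (fun x => x)).getD 0
      if ia ≠ ib then
        let aOld := PySem.List.pyGetD st.1 ia 0
        let bOld := PySem.List.pyGetD st.1 ib 0
        ((st.1.set ia.toNat vb).set ib.toNat va,
         (((st.2.modify aOld [] (fun s => PySem.Set.discard s ia)).modify bOld []
             (fun s => PySem.Set.discard s ib)).modify vb []
             (fun s => PySem.Set.add s ia)).modify va [] (fun s => PySem.Set.add s ib))
      else st
  | _, _ => st   -- v[0] / v[1] raises IndexError in Python; excluded by Pre_add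

def add_alt (X : List Int) (V : List (List Int)) : List Int :=
  (V.foldl altStep (X, altInit X)).1

-- ===== PRECONDITION & SPEC =====
-- Pre_add excludes exactly the swap entries v with fewer than 2 elements, on which the Python A
-- raises IndexError at v[0] / v[1].
def Pre_add (X : List Int) (V : List (List Int)) : Prop :=
  ∀ v ∈ V, 2 ≤ v.length
instance (X : List Int) (V : List (List Int)) : Decidable (Pre_add X V) := by
  unfold Pre_add; infer_instance

def pvWitness_add : List Int × List (List Int) := ([1, 2, 3], [[1, 3], [2, 5]])

def Spec_add (X : List Int) (V : List (List Int)) (out : List Int) : Prop := out = add_alt X V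
instance (X : List Int) (V : List (List Int)) (out : List Int) : Decidable (Spec_add X V out) := by
  unfold Spec_add; infer_instance

-- ===== CLAIM (what is proved, stated in full; the proofs are below) =====
def Claim_equal_add : Prop :=
  ∀ (X : List Int) (V : List (List Int)), Dom_add X V → Pre_add X V → Spec_add X V (add X V)

-- ===== LEMMAS AND PROOFS =====

-- The loop invariant relating B's dictionary to the current list: for each value w, the stored
-- set holds exactly the indices at which w occurs in the list.
def SInv (d : PySem.Dict Int (List Int)) (l : List Int) : Prop :=
  ∀ (w i : Int), i ∈ d.getD w [] ↔ ∃ k : Nat, i = (k : Int) ∧ ∃ h : k < l.length, l[k] = w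

-- B's per-value index expression (0 when the value is absent, else max of its index set).
def idxB (d : PySem.Dict Int (List Int)) (w : Int) : Int :=
  if d.getD w [] = [] then 0 else (PySem.List.max? (d.getD w []) (fun x => x)).getD 0

-- A's scan keeps the LAST index at which the value occurs (default 0): `lastBelow l v n` is
-- the largest k < n with l[k] = v.
def lastBelow (l : List Int) (v : Int) : Nat → Option Nat
  | 0 => none
  | n + 1 => if l[n]? = some v then some n else lastBelow l v n

theorem lastBelow_none (l : List Int) (v : Int) (n : Nat)
    (h : ∀ k, k < n → ¬(∃ hk : k < l.length, l[k] = v)) : lastBelow l v n = none := by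
  induction n with
  | zero => rfl
  | succ m ih =>
    rw [lastBelow, if_neg, ih (fun k hk => h k (by omega))]
    intro he
    obtain ⟨hm, hv⟩ := List.getElem?_eq_some_iff.mp he
    exact h m (by omega) ⟨hm, hv⟩

theorem lastBelow_some_spec (l : List Int) (v : Int) (n k : Nat)
    (h : lastBelow l v n = some k) : k < n ∧ ∃ hk : k < l.length, l[k] = v := by
  induction n with
  | zero => cases h
  | succ m ih =>
    rw [lastBelow] at h
    by_cases hc : l[m]? = some v
    · rw [if_pos hc] at h
      obtain ⟨hm, hv⟩ := List.getElem?_eq_some_iff.mp hc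
      cases h
      exact ⟨by omega, hm, hv⟩
    · rw [if_neg hc] at h
      obtain ⟨h1, h2⟩ := ih h
      exact ⟨by omega, h2⟩

theorem lastBelow_isSome (l : List Int) (v : Int) (n k : Nat)
    (hk : k < n) (hkl : k < l.length) (hv : l[k] = v) : lastBelow l v n ≠ none := by
  induction n with
  | zero => omega
  | succ m ih =>
    rw [lastBelow]
    by_cases hc : l[m]? = some v
    · rw [if_pos hc]; simp
    · rw [if_neg hc]
      have hkm : k ≠ m := by
        intro he
        exact hc (he ▸ List.getElem?_eq_some_iff.mpr ⟨hkl, hv⟩)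
      exact ih (by omega)

theorem lastBelow_ge (l : List Int) (v : Int) (n k j : Nat)
    (h : lastBelow l v n = some k) (hj : j < n) (hjl : j < l.length) (hv : l[j] = v) :
    j ≤ k := by
  induction n with
  | zero => omega
  | succ m ih =>
    rw [lastBelow] at h
    by_cases hc : l[m]? = some v
    · rw [if_pos hc] at h
      cases h
      omega
    · rw [if_neg hc] at h
      have hjm : j ≠ m := by
        intro he
        exact hc (he ▸ List.getElem?_eq_some_iff.mpr ⟨hjl, hv⟩)
      exact ih h (by omega)

theorem scanFold (l : List Int) (v : Int) (n : Nat) (hn : n ≤ l.length) (a : Int) :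
    (PySem.List.pyRange 0 (n : Int) 1).foldl
      (fun (a : Int) i => if PySem.List.pyGetD l i 0 = v then i else a) a
    = match lastBelow l v n with | some k => (k : Int) | none => a := by
  induction n generalizing a with
  | zero => simp [lastBelow]
  | succ m ih =>
    have hsplit : PySem.List.pyRange 0 ((m + 1 : Nat) : Int) 1
        = PySem.List.pyRange 0 (m : Int) 1 ++ [(m : Int)] := by
      have := PySem.List.pyRange_one_succ_right (a := 0) (b := (m : Int)) (by positivity)
      push_cast
      exact this
    rw [hsplit, List.foldl_append]
    have hm : m < l.length := by omega
    have hcond : PySem.List.pyGetD l (m : Int) 0 = l[m] := by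
      rw [PySem.List.pyGetD_natCast, List.getD_eq_getElem l 0 hm]
    have hopt : l[m]? = some l[m] := List.getElem?_eq_getElem hm
    simp only [List.foldl_cons, List.foldl_nil, hcond]
    rw [lastBelow]
    by_cases hv : l[m] = v
    · rw [if_pos hv, if_pos (hv ▸ hopt)]
    · rw [if_neg hv, if_neg (fun hc => hv (Option.some.inj ((hopt.symm).trans hc))),
        ih (by omega) a]

theorem idx_eq (l : List Int) (d : PySem.Dict Int (List Int)) (hinv : SInv d l) (w : Int) :
    (match lastBelow l w l.length with | some k => (k : Int) | none => 0) = idxB d w := by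
  unfold idxB
  by_cases hs : d.getD w [] = []
  · rw [if_pos hs]
    rw [lastBelow_none l w l.length ?_]
    intro k hk ⟨hkl, hv⟩
    have := (hinv w (k : Int)).mpr ⟨k, rfl, hkl, hv⟩
    rw [hs] at this
    cases this
  · rw [if_neg hs]
    obtain ⟨m, hm⟩ : ∃ m, PySem.List.max? (d.getD w []) (fun x => x) = some m := by
      cases hmm : PySem.List.max? (d.getD w []) (fun x => x) with
      | none => exact absurd ((PySem.List.max?_eq_none_iff _ _).mp hmm) hs
      | some m => exact ⟨m, rfl⟩
    rw [hm]
    have hmem : m ∈ d.getD w [] := PySem.List.max?_mem hm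
    obtain ⟨km, hkm_eq, hkm_lt, hkm_val⟩ := (hinv w m).mp hmem
    cases hlb : lastBelow l w l.length with
    | none => exact absurd hlb (lastBelow_isSome l w l.length km (by omega) hkm_lt hkm_val)
    | some k =>
      obtain ⟨hkn, hkl, hkv⟩ := lastBelow_some_spec l w l.length k hlb
      have h1 : (k : Int) ≤ m :=
        PySem.List.max?_isMax hm _ ((hinv w (k : Int)).mpr ⟨k, rfl, hkl, hkv⟩)
      have h2 : km ≤ k := lastBelow_ge l w l.length k km hlb (by omega) hkm_lt hkm_val
      simp only [Option.getD_some]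
      omega

theorem addScan_eq (l : List Int) (va vb : Int) (d : PySem.Dict Int (List Int))
    (hinv : SInv d l) :
    addScan l va vb (l.length : Int) = (idxB d va, idxB d vb) := by
  unfold addScan
  refine (PySem.List.foldl_prod_mk
    (fun (a : Int) (i : Int) => if PySem.List.pyGetD l i 0 = va then i else a)
    (fun (a : Int) (i : Int) => if PySem.List.pyGetD l i 0 = vb then i else a)
    (PySem.List.pyRange 0 (l.length : Int) 1) 0 0).trans ?_
  rw [scanFold l va l.length le_rfl 0, scanFold l vb l.length le_rfl 0,
    idx_eq l d hinv va, idx_eq l d hinv vb]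

theorem idx_cases (l : List Int) (d : PySem.Dict Int (List Int)) (hinv : SInv d l) (w : Int) :
    (∃ k : Nat, ∃ hk : k < l.length, l[k] = w ∧ idxB d w = (k : Int)) ∨
      (w ∉ l ∧ idxB d w = 0) := by
  unfold idxB
  by_cases hs : d.getD w [] = []
  · refine Or.inr ⟨?_, by rw [if_pos hs]⟩
    intro hmem
    obtain ⟨k, hk, hv⟩ := List.mem_iff_getElem.mp hmem
    have := (hinv w (k : Int)).mpr ⟨k, rfl, hk, hv⟩
    rw [hs] at this
    cases this
  · obtain ⟨m, hm⟩ : ∃ m, PySem.List.max? (d.getD w []) (fun x => x) = some m := by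
      cases hmm : PySem.List.max? (d.getD w []) (fun x => x) with
      | none => exact absurd ((PySem.List.max?_eq_none_iff _ _).mp hmm) hs
      | some m => exact ⟨m, rfl⟩
    obtain ⟨km, hkm_eq, hkm_lt, hkm_val⟩ := (hinv w m).mp (PySem.List.max?_mem hm)
    exact Or.inl ⟨km, hkm_lt, hkm_val, by rw [if_neg hs, hm, Option.getD_some, hkm_eq]⟩

theorem mem_getD_modify_add (d : PySem.Dict Int (List Int)) (k : Int) (x w i : Int) :
    i ∈ (d.modify k [] (fun s => PySem.Set.add s x)).getD w []
      ↔ i ∈ d.getD w [] ∨ (w = k ∧ i = x) := by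
  by_cases h : w = k
  · subst h
    rw [PySem.Dict.getD_modify_self, PySem.Set.mem_add]
    tauto
  · rw [PySem.Dict.getD_modify_of_ne _ _ _ h]
    tauto
theorem mem_getD_modify_discard (d : PySem.Dict Int (List Int)) (k : Int) (x w i : Int) :
    i ∈ (d.modify k [] (fun s => PySem.Set.discard s x)).getD w []
      ↔ i ∈ d.getD w [] ∧ ¬(w = k ∧ i = x) := by
  by_cases h : w = k
  · subst h
    rw [PySem.Dict.getD_modify_self, PySem.Set.mem_discard]
    tauto
  · rw [PySem.Dict.getD_modify_of_ne _ _ _ h]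
    tauto

theorem inv_init (X : List Int) : SInv (altInit X) X := by
  induction X using List.reverseRecOn with
  | nil => intro w i; simp [altInit, PySem.List.enumerate_nil, PySem.Dict.getD_empty]
  | append_singleton xs x ih =>
    intro w i
    have hunf : altInit (xs ++ [x])
        = (altInit xs).modify x [] (fun s => PySem.Set.add s (0 + (xs.length : Int))) := by
      simp [altInit, PySem.List.enumerate_append, PySem.List.enumerate_cons,
        PySem.List.enumerate_nil, List.foldl_append]
    rw [hunf, mem_getD_modify_add, ih w i]
    constructor
    · rintro (⟨k, hik, hk, hv⟩ | ⟨hw, hi⟩)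
      · refine ⟨k, hik, by simp; omega, ?_⟩
        rw [List.getElem_append_left hk]
        exact hv
      · refine ⟨xs.length, by omega, by simp, ?_⟩
        rw [hw]
        simp
    · rintro ⟨k, hik, hk, hv⟩
      rcases Nat.lt_or_ge k xs.length with h' | h'
      · refine Or.inl ⟨k, hik, h', ?_⟩
        have e : (xs ++ [x])[k] = xs[k] := List.getElem_append_left h'
        rw [e] at hv
        exact hv
      · have hkl : k = xs.length := by simp at hk; omega
        subst hkl
        have hxw : x = w := by simpa using hv
        exact Or.inr ⟨hxw.symm, by omega⟩

theorem swap_main (l : List Int) (d : PySem.Dict Int (List Int)) (va vb : Int) (ka kb : Nat)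
    (hinv : SInv d l) (hka : ka < l.length) (hkb : kb < l.length) (hne : ka ≠ kb) :
    SInv ((((d.modify (l[ka]) [] (fun s => PySem.Set.discard s (ka : Int))).modify (l[kb]) []
             (fun s => PySem.Set.discard s (kb : Int))).modify vb []
             (fun s => PySem.Set.add s (ka : Int))).modify va []
             (fun s => PySem.Set.add s (kb : Int)))
      ((l.set ka vb).set kb va) := by
  have hlen' : ((l.set ka vb).set kb va).length = l.length := by simp
  have hget' : ∀ (k : Nat) (hk : k < l.length),
      ((l.set ka vb).set kb va)[k]'(by omega) =
        if k = kb then va else if k = ka then vb else l[k] := by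
    intro k hk
    rw [List.getElem_set, List.getElem_set]
    by_cases h1 : k = kb
    · rw [if_pos h1.symm, if_pos h1]
    · rw [if_neg (fun hh => h1 hh.symm), if_neg h1]
      by_cases h2 : k = ka
      · rw [if_pos h2.symm, if_pos h2]
      · rw [if_neg (fun hh => h2 hh.symm), if_neg h2]
  intro w i
  rw [mem_getD_modify_add, mem_getD_modify_add, mem_getD_modify_discard,
    mem_getD_modify_discard, hinv w i]
  constructor
  · rintro ((⟨⟨⟨k, hik, hk, hv⟩, hnaold⟩, hnbold⟩ | ⟨hwb, hika⟩) | ⟨hwa, hikb⟩)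
    · have hkka : k ≠ ka := by
        intro he
        subst he
        exact hnaold ⟨hv.symm, by rw [hik]⟩
      have hkkb : k ≠ kb := by
        intro he
        subst he
        exact hnbold ⟨hv.symm, by rw [hik]⟩
      refine ⟨k, hik, by omega, ?_⟩
      rw [hget' k hk, if_neg hkkb, if_neg hkka]
      exact hv
    · refine ⟨ka, hika, by omega, ?_⟩
      rw [hget' ka hka, if_neg hne, if_pos rfl, hwb]
    · refine ⟨kb, hikb, by omega, ?_⟩
      rw [hget' kb hkb, if_pos rfl, hwa]
  · rintro ⟨k, hik, hk, hv⟩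
    have hk' : k < l.length := by omega
    have hv' : (if k = kb then va else if k = ka then vb else l[k]) = w :=
      (hget' k hk').symm.trans hv
    by_cases h1 : k = kb
    · rw [if_pos h1] at hv'
      exact Or.inr ⟨hv'.symm, by rw [hik, h1]⟩
    · rw [if_neg h1] at hv'
      by_cases h2 : k = ka
      · rw [if_pos h2] at hv'
        exact Or.inl (Or.inr ⟨hv'.symm, by rw [hik, h2]⟩)
      · rw [if_neg h2] at hv'
        refine Or.inl (Or.inl ⟨⟨⟨k, hik, hk', hv'⟩, ?_⟩, ?_⟩)
        · rintro ⟨hw1, hi1⟩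
          rw [hik] at hi1
          exact h2 (by omega)
        · rintro ⟨hw1, hi1⟩
          rw [hik] at hi1
          exact h1 (by omega)

theorem step_core (l : List Int) (d : PySem.Dict Int (List Int)) (va vb : Int) (ka kb : Nat)
    (hinv : SInv d l)
    (hgda : idxB d va = (ka : Int)) (hgdb : idxB d vb = (kb : Int))
    (hka : ka < l.length) (hkb : kb < l.length) (hne : ka ≠ kb) :
    ((l.set (idxB d va).toNat vb).set (idxB d vb).toNat va).length = l.length ∧
    SInv ((((d.modify (PySem.List.pyGetD l (idxB d va) 0) []
              (fun s => PySem.Set.discard s (idxB d va))).modify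
              (PySem.List.pyGetD l (idxB d vb) 0) []
              (fun s => PySem.Set.discard s (idxB d vb))).modify vb []
              (fun s => PySem.Set.add s (idxB d va))).modify va []
              (fun s => PySem.Set.add s (idxB d vb)))
      ((l.set (idxB d va).toNat vb).set (idxB d vb).toNat va) := by
  have ea : PySem.List.pyGetD l (idxB d va) 0 = l[ka] := by
    rw [hgda, PySem.List.pyGetD_natCast, List.getD_eq_getElem l 0 hka]
  have eb : PySem.List.pyGetD l (idxB d vb) 0 = l[kb] := by
    rw [hgdb, PySem.List.pyGetD_natCast, List.getD_eq_getElem l 0 hkb]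
  rw [ea, eb, hgda, hgdb]
  simp only [Int.toNat_natCast]
  exact ⟨by simp, swap_main l d va vb ka kb hinv hka hkb hne⟩

theorem step_good (X l : List Int) (d : PySem.Dict Int (List Int)) (v : List Int)
    (hlen : l.length = X.length) (hinv : SInv d l) :
    (altStep (l, d) v).1 = addStep X l v ∧
    (altStep (l, d) v).1.length = X.length ∧
    SInv (altStep (l, d) v).2 (altStep (l, d) v).1 := by
  unfold altStep addStep
  cases hv0 : PySem.List.pyGet? v 0 with
  | none => exact ⟨rfl, hlen, hinv⟩
  | some va =>
    cases hv1 : PySem.List.pyGet? v 1 with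
    | none => exact ⟨rfl, hlen, hinv⟩
    | some vb =>
      simp only
      have hscan : addScan l va vb (X.length : Int) = (idxB d va, idxB d vb) := by
        rw [← hlen]; exact addScan_eq l va vb d hinv
      rw [hscan,
        show (if d.getD va [] = [] then (0 : Int)
              else (PySem.List.max? (d.getD va []) fun x => x).getD 0) = idxB d va from rfl,
        show (if d.getD vb [] = [] then (0 : Int)
              else (PySem.List.max? (d.getD vb []) fun x => x).getD 0) = idxB d vb from rfl]
      by_cases hcond : idxB d va ≠ idxB d vb
      · rw [if_pos hcond, if_pos hcond]
        have pack :
            ((l.set (idxB d va).toNat vb).set (idxB d vb).toNat va).length = l.length ∧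
            SInv ((((d.modify (PySem.List.pyGetD l (idxB d va) 0) []
                      (fun s => PySem.Set.discard s (idxB d va))).modify
                      (PySem.List.pyGetD l (idxB d vb) 0) []
                      (fun s => PySem.Set.discard s (idxB d vb))).modify vb []
                      (fun s => PySem.Set.add s (idxB d va))).modify va []
                      (fun s => PySem.Set.add s (idxB d vb)))
              ((l.set (idxB d va).toNat vb).set (idxB d vb).toNat va) := by
          rcases idx_cases l d hinv va with ⟨ka, hka, hvala, hgda⟩ | ⟨hvana, hgda⟩ <;>
            rcases idx_cases l d hinv vb with ⟨kb, hkb, hvalb, hgdb⟩ | ⟨hvbnb, hgdb⟩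
          · refine step_core l d va vb ka kb hinv hgda hgdb hka hkb ?_
            rw [hgda, hgdb] at hcond
            omega
          · refine step_core l d va vb ka 0 hinv hgda (by exact_mod_cast hgdb) hka
              (by omega) ?_
            rw [hgda, hgdb] at hcond
            omega
          · refine step_core l d va vb 0 kb hinv (by exact_mod_cast hgda) hgdb
              (by omega) hkb ?_
            rw [hgda, hgdb] at hcond
            omega
          · exfalso
            rw [hgda, hgdb] at hcond
            exact hcond rfl
        exact ⟨rfl, by rw [pack.1, hlen], pack.2⟩
      · rw [if_neg hcond, if_neg hcond]
        exact ⟨rfl, hlen, hinv⟩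

theorem loop_eq (X : List Int) (V : List (List Int)) (l : List Int)
    (d : PySem.Dict Int (List Int))
    (hlen : l.length = X.length) (hinv : SInv d l) :
    (V.foldl altStep (l, d)).1 = V.foldl (addStep X) l := by
  induction V generalizing l d with
  | nil => rfl
  | cons v V ih =>
    obtain ⟨h1, h2, h3⟩ := step_good X l d v hlen hinv
    simp only [List.foldl_cons]
    rw [← h1]
    have hpair : altStep (l, d) v = ((altStep (l, d) v).1, (altStep (l, d) v).2) := rfl
    rw [hpair]
    exact ih _ _ h2 h3

-- ===== VERDICT (by name: the statement is the Claim_ definition above) =====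
theorem add_spec : Claim_equal_add := by
  intro X V _ _
  unfold Spec_add add add_alt
  exact (loop_eq X V X (altInit X) rfl (inv_init X)).symm
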